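-- pv_equiv track=rewrite | github.com/s21violette/Brand-matching | src/script.py | matches_transpose
-- ===== SOURCE A (Python) =====
-- def matches_transpose(st1: str, st2: str):
--     mx = st1 if len(st1) > len(st2) else st2
--     mn = st2 if len(st2) < len(st1) else st1 if mx != st1 else st2
--     match = 0
--     trans = 0
--     for i in range(len(mn)):
--         for j in range(len(mx)):
--             if mn[i] == mx[j]:
--                 match += 1
--                 if i != j:
--                     trans += 1
--                 break
--     return match, trans
-- ===== SOURCE B (Python) =====
-- def matches_transpose(st1: str, st2: str):
--     mn, mx = (st2, st1) if len(st1) > len(st2) else (st1, st2)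
--     chars = set(mx)
--     match = sum(1 for c in mn if c in chars)
--     # A character mn[i] is a non-transposed match exactly when it is a "fresh
--     # fixed point": mn[i] == mx[i] and that character does not occur earlier
--     # in mx (so its first occurrence in mx is at index i itself).
--     fixed = 0
--     seen = set()
--     for a, b in zip(mn, mx):
--         if a == b and a not in seen:
--             fixed += 1
--         seen.add(b)
--     return match, match - fixed
-- ===== Notes on version B (the rewrite author's own statement) =====
-- stated objective: faster
-- what changed: B never computes first-occurrence indices at all: it counts matches as a set-membership sum over the shorter string, counts non-transposed matches in one zip pass as 'fresh fixed points' (mn[i]==mx[i] with that char unseen earlier in mx), and obtains trans by the closed form trans = match - fixed.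
import Mathlib
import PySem

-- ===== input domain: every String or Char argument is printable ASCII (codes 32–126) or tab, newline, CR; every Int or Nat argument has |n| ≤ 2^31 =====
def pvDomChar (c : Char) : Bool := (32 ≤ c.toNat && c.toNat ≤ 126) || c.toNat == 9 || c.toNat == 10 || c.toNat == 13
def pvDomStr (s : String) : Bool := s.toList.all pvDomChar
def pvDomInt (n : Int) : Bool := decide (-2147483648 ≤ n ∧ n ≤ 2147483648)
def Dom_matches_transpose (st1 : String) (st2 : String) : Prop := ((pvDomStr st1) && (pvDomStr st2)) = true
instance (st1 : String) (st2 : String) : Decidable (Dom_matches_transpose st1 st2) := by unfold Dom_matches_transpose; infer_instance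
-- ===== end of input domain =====

-- B never searches for first-occurrence indices: match is a set-membership count and
-- trans is the closed form match - (number of fresh fixed points found in one zip pass);
-- objective: faster (asymptotic, O(n+m) vs O(n*m)).

-- ===== PORT A =====
-- A's inner `for j in range(len(mx))` with `break`: scan mx keeping the running index j
def mtInnerA (c : Char) (mx : List Char) (i : Int) (j : Int) : Int × Int :=
  match mx with
  | [] => (0, 0)
  | x :: rest => if c = x then (1, if i ≠ j then 1 else 0) else mtInnerA c rest i (j + 1)

-- A's outer `for i in range(len(mn))` accumulating match and trans
def mtOuterA (mx : List Char) (mn : List Char) (i : Int) (acc : Int × Int) : Int × Int :=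
  match mn with
  | [] => acc
  | c :: rest =>
      let r := mtInnerA c mx i 0
      mtOuterA mx rest (i + 1) (acc.1 + r.1, acc.2 + r.2)

def matches_transpose (st1 : String) (st2 : String) : Int × Int :=
  let mx := if st1.toList.length > st2.toList.length then st1 else st2
  let mn := if st2.toList.length < st1.toList.length then st2
            else if mx ≠ st1 then st1 else st2
  mtOuterA mx.toList mn.toList 0 (0, 0)

-- ===== PORT B =====
-- Source B: `match = sum(1 for c in mn if c in chars)`
def bMatch (chars : PySem.Set Char) (mn : List Char) : Int :=
  match mn with
  | [] => 0
  | c :: rest => (if chars.contains c then 1 else 0) + bMatch chars rest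

-- Source B: `for a, b in zip(mn, mx): if a == b and a not in seen: fixed += 1; seen.add(b)`
def bFixed (z : List (Char × Char)) (seen : PySem.Set Char) (f : Int) : Int :=
  match z with
  | [] => f
  | (a, b) :: rest =>
      bFixed rest (PySem.Set.add seen b)
        (if a = b ∧ ¬ PySem.Set.contains seen a then f + 1 else f)

def matches_transpose_alt (st1 : String) (st2 : String) : Int × Int :=
  let p := if st1.toList.length > st2.toList.length then (st2.toList, st1.toList)
           else (st1.toList, st2.toList)
  let chars := PySem.Set.ofList p.2
  let m := bMatch chars p.1
  (m, m - bFixed (p.1.zip p.2) PySem.Set.empty 0)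

-- ===== PRECONDITION & SPEC =====
def Spec_matches_transpose (st1 : String) (st2 : String) (out : Int × Int) : Prop := out = matches_transpose_alt st1 st2
instance (st1 : String) (st2 : String) (out : Int × Int) : Decidable (Spec_matches_transpose st1 st2 out) := by unfold Spec_matches_transpose; infer_instance

-- ===== CLAIM (what is proved, stated in full; the proofs are below) =====
def Claim_equal_matches_transpose : Prop := ∀ (st1 : String) (st2 : String), Dom_matches_transpose st1 st2 → Spec_matches_transpose st1 st2 (matches_transpose st1 st2)

-- ===== LEMMAS AND PROOFS =====

-- first index of c in l counting from j (the value A's inner loop `break`s at)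
def fidx (c : Char) : List Char → Int → Option Int
  | [], _ => none
  | x :: r, j => if c = x then some j else fidx c r (j + 1)

theorem mtInnerA_none (c : Char) (mx : List Char) : ∀ i j : Int,
    fidx c mx j = none → mtInnerA c mx i j = (0, 0) := by
  induction mx with
  | nil => intro i j _; rfl
  | cons x rest ih =>
      intro i j h
      by_cases hcx : c = x
      · simp [fidx, hcx] at h
      · simp only [fidx, if_neg hcx] at h
        simp [mtInnerA, hcx, ih i (j + 1) h]

theorem mtInnerA_some (c : Char) (mx : List Char) : ∀ i j k : Int,
    fidx c mx j = some k → mtInnerA c mx i j = (1, if i ≠ k then 1 else 0) := by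
  induction mx with
  | nil => intro i j k h; simp [fidx] at h
  | cons x rest ih =>
      intro i j k h
      by_cases hcx : c = x
      · simp only [fidx, if_pos hcx] at h
        simp only [Option.some.injEq] at h
        simp [mtInnerA, hcx, h]
      · simp only [fidx, if_neg hcx] at h
        simp [mtInnerA, hcx, ih i (j + 1) k h]

theorem fidx_none_iff (c : Char) : ∀ (l : List Char) (j : Int),
    fidx c l j = none ↔ c ∉ l := by
  intro l
  induction l with
  | nil => intro j; simp [fidx]
  | cons x r ih =>
      intro j
      by_cases h : c = x
      · simp [fidx, h]
      · simp [fidx, h, ih]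

theorem fidx_shape (c : Char) : ∀ (l : List Char) (j k : Int),
    fidx c l j = some k → ∃ i : Nat, k = j + i ∧ i < l.length := by
  intro l
  induction l with
  | nil => intro j k h; simp [fidx] at h
  | cons x r ih =>
      intro j k h
      by_cases hcx : c = x
      · simp [fidx, hcx] at h
        exact ⟨0, by omega, by simp⟩
      · simp [fidx, hcx] at h
        obtain ⟨i, hi, hlen⟩ := ih (j + 1) k h
        exact ⟨i + 1, by push_cast; omega, by simp; omega⟩

theorem fidx_some_iff (c : Char) : ∀ (l : List Char) (i : Nat) (j : Int),
    (fidx c l j = some (j + i)) ↔ (∃ h : i < l.length, l[i] = c ∧ c ∉ l.take i) := by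
  intro l
  induction l with
  | nil => intro i j; simp [fidx]
  | cons x r ih =>
      intro i j
      by_cases hcx : c = x
      · cases i with
        | zero => simp [fidx, hcx]
        | succ k =>
            constructor
            · intro h
              simp [fidx, hcx] at h
              exfalso; omega
            · rintro ⟨h, _, hnot⟩
              exfalso
              exact hnot (by simp [hcx])
        -- when c = x: fidx returns some j, equal to some (j+i) iff i = 0
      · cases i with
        | zero =>
            constructor
            · intro h
              simp only [fidx, if_neg hcx] at h
              obtain ⟨i', hi', _⟩ := fidx_shape c r (j + 1) _ h
              omega
            · rintro ⟨h, hc, _⟩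
              simp at hc
              exact absurd hc.symm hcx
        | succ k =>
            have : j + (↑(k + 1) : Int) = (j + 1) + ↑k := by push_cast; omega
            rw [show (fidx c (x :: r) j) = fidx c r (j + 1) by simp [fidx, hcx], this, ih k (j + 1)]
            constructor
            · rintro ⟨h, hc, hnot⟩
              refine ⟨by simpa using h, by simpa using hc, ?_⟩
              simp
              exact ⟨fun he => hcx he, hnot⟩
            · rintro ⟨h, hc, hnot⟩
              simp at hnot
              exact ⟨by simpa using h, by simpa using hc, hnot.2⟩

theorem bFixed_shift : ∀ (z : List (Char × Char)) (s : PySem.Set Char) (f : Int),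
    bFixed z s f = f + bFixed z s 0 := by
  intro z
  induction z with
  | nil => intro s f; simp [bFixed]
  | cons p rest ih =>
      intro s f
      obtain ⟨a, b⟩ := p
      simp only [bFixed]
      by_cases h : a = b ∧ ¬ PySem.Set.contains s a
      · rw [if_pos h, if_pos h, ih _ (f + 1), ih _ (0 + 1)]; ring
      · rw [if_neg h, if_neg h, ih _ f]

theorem take_succ_getElem (l : List Char) (i : Nat) (h : i < l.length) :
    l.take (i + 1) = l.take i ++ [l[i]] := by
  rw [List.take_add_one]
  simp [List.getElem?_eq_getElem h]

-- Main invariant: A's remaining outer loop equals B's closed form on the remaining suffix.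
theorem main_inv (mx : List Char) : ∀ (mn : List Char) (i : Nat) (m t : Int),
    mtOuterA mx mn (i : Int) (m, t) =
      (m + bMatch (PySem.Set.ofList mx) mn,
       t + bMatch (PySem.Set.ofList mx) mn
         - bFixed (mn.zip (mx.drop i)) (PySem.Set.ofList (mx.take i)) 0) := by
  intro mn
  induction mn with
  | nil => intro i m t; simp [mtOuterA, bMatch, bFixed]
  | cons c rest ih =>
      intro i m t
      have hcast : (i : Int) + 1 = ((i + 1 : Nat) : Int) := by push_cast; ring
      by_cases hlen : i < mx.length
      · -- mx.drop i = mx[i] :: mx.drop (i+1)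
        have hdrop : mx.drop i = mx[i] :: mx.drop (i + 1) := List.drop_eq_getElem_cons hlen
        have hseen : PySem.Set.add (PySem.Set.ofList (mx.take i)) mx[i]
            = PySem.Set.ofList (mx.take (i + 1)) := by
          rw [take_succ_getElem mx i hlen, PySem.Set.ofList_append_singleton]
        have hcond : (c = mx[i] ∧ ¬ PySem.Set.contains (PySem.Set.ofList (mx.take i)) c)
            ↔ fidx c mx 0 = some ((0 : Int) + i) := by
          rw [fidx_some_iff]
          constructor
          · rintro ⟨hc, hnot⟩
            refine ⟨hlen, hc.symm, fun hm => hnot ?_⟩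
            rw [PySem.Set.contains_iff, PySem.Set.mem_ofList]; exact hm
          · rintro ⟨h, hc, hnot⟩
            refine ⟨hc.symm, fun hct => hnot ?_⟩
            rw [PySem.Set.contains_iff, PySem.Set.mem_ofList] at hct; exact hct
        simp only [mtOuterA, hdrop, List.zip_cons_cons, bFixed, bMatch]
        rw [hcast, ih (i + 1), hseen]
        cases hf : fidx c mx 0 with
        | none =>
            rw [mtInnerA_none c mx (i : Int) 0 hf]
            have hnotmem : c ∉ mx := (fidx_none_iff c mx 0).mp hf
            have hcontains : PySem.Set.contains (PySem.Set.ofList mx) c = false := by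
              rw [Bool.eq_false_iff]
              intro hct
              exact hnotmem (by rw [PySem.Set.contains_iff, PySem.Set.mem_ofList] at hct; exact hct)
            have hcond' : ¬ (c = mx[i] ∧ ¬ PySem.Set.contains (PySem.Set.ofList (mx.take i)) c) := by
              rintro ⟨hc, _⟩
              exact hnotmem (hc ▸ List.getElem_mem hlen)
            rw [if_neg hcond', hcontains]
            simp
        | some k =>
            obtain ⟨i₀, hk, hi₀⟩ := fidx_shape c mx 0 k hf
            have hmem : c ∈ mx := by
              by_contra hnm
              rw [← fidx_none_iff c mx 0] at hnm
              simp [hnm] at hf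
            have hcontains : PySem.Set.contains (PySem.Set.ofList mx) c = true := by
              rw [PySem.Set.contains_iff, PySem.Set.mem_ofList]; exact hmem
            have hcond2 : (c = mx[i] ∧ ¬ PySem.Set.contains (PySem.Set.ofList (mx.take i)) c)
                ↔ i₀ = i := by
              rw [hcond, hf]
              constructor
              · intro h; have := Option.some.inj h; omega
              · intro h; congr 1; omega
            rw [mtInnerA_some c mx (i : Int) 0 k hf, hcontains]
            by_cases heq : i₀ = i
            · rw [if_pos (hcond2.mpr heq), if_neg (by omega : ¬ (i : Int) ≠ k)]
              have hb := bFixed_shift (rest.zip (mx.drop (i + 1)))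
                (PySem.Set.ofList (mx.take (i + 1))) (0 + 1)
              simp at hb ⊢
              constructor <;> linarith
            · have hik : (i : Int) ≠ k := by omega
              rw [if_neg (fun hc2 => heq (hcond2.mp hc2)), if_pos hik]
              simp
              constructor <;> ring
      · -- i beyond mx: drop = [], take = mx; no zip pairs remain
        have hdrop : mx.drop i = [] := List.drop_eq_nil_of_le (by omega)
        have hdrop' : mx.drop (i + 1) = [] := List.drop_eq_nil_of_le (by omega)
        simp only [mtOuterA, hdrop, List.zip_nil_right, bFixed, bMatch]
        rw [hcast, ih (i + 1), hdrop', List.zip_nil_right]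
        cases hf : fidx c mx 0 with
        | none =>
            rw [mtInnerA_none c mx (i : Int) 0 hf]
            have hnotmem : c ∉ mx := (fidx_none_iff c mx 0).mp hf
            have hcontains : PySem.Set.contains (PySem.Set.ofList mx) c = false := by
              rw [Bool.eq_false_iff]
              intro hct
              exact hnotmem (by rw [PySem.Set.contains_iff, PySem.Set.mem_ofList] at hct; exact hct)
            rw [hcontains]; simp [bFixed]
        | some k =>
            obtain ⟨i₀, hk, hi₀⟩ := fidx_shape c mx 0 k hf
            have hmem : c ∈ mx := by
              by_contra hnm
              rw [← fidx_none_iff c mx 0] at hnm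
              simp [hnm] at hf
            have hcontains : PySem.Set.contains (PySem.Set.ofList mx) c = true := by
              rw [PySem.Set.contains_iff, PySem.Set.mem_ofList]; exact hmem
            have hik : (i : Int) ≠ k := by omega
            rw [mtInnerA_some c mx (i : Int) 0 k hf, hcontains, if_pos hik]
            simp [bFixed]
            constructor <;> ring

theorem run_eq (mn mx : List Char) :
    mtOuterA mx mn 0 (0, 0) =
      (bMatch (PySem.Set.ofList mx) mn,
       bMatch (PySem.Set.ofList mx) mn - bFixed (mn.zip mx) PySem.Set.empty 0) := by
  have h := main_inv mx mn 0 0 0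
  simpa [PySem.Set.empty] using h

-- ===== VERDICT (by name: the statement is the Claim_ definition above) =====
theorem matches_transpose_spec : Claim_equal_matches_transpose := by
  intro st1 st2 _
  unfold Spec_matches_transpose matches_transpose matches_transpose_alt
  by_cases h : st1.toList.length > st2.toList.length
  · simp only [if_pos h]
    exact run_eq _ _
  · simp only [if_neg h]
    by_cases he : st2 ≠ st1
    · simp only [if_pos he]
      exact run_eq _ _
    · have he2 : st2 = st1 := not_ne_iff.mp he
      simp only [he2, ne_eq, not_true_eq_false, if_false]
      exact run_eq _ _
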